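-- pv_equiv track=rewrite | github.com/iyptcc/iypt-cc | apps/printer/utils.py | initials
-- ===== SOURCE A (Python) =====
-- def initials(name: str, fullwords: int = 0):
--     names = name.split(" ")
--     parts = []
--     if fullwords < 0:
--         names = reversed(names)
--     for i, n in enumerate(names):
--         if i < abs(fullwords):
--             parts.append(n)
--         else:
--             parts.append(n[:1] + ".")
--     if fullwords < 0:
--         parts = reversed(parts)
--     return " ".join(parts)
-- ===== SOURCE B (Python) =====
-- def initials(name: str, fullwords: int = 0):
--     words = name.split(" ")
--     n = len(words)
--     return " ".join(
--         w if (i < fullwords if fullwords >= 0 else i >= n + fullwords) else w[:1] + "."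
--         for i, w in enumerate(words)
--     )
-- ===== Notes on version B (the rewrite author's own statement) =====
-- stated objective: simpler
-- what changed: Drops A's reverse-enumerate-reverse round trip for negative fullwords and instead makes one forward pass over the split words, keeping a word full by direct index arithmetic (i < fullwords, or i >= n + fullwords when fullwords < 0).
import Mathlib
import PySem

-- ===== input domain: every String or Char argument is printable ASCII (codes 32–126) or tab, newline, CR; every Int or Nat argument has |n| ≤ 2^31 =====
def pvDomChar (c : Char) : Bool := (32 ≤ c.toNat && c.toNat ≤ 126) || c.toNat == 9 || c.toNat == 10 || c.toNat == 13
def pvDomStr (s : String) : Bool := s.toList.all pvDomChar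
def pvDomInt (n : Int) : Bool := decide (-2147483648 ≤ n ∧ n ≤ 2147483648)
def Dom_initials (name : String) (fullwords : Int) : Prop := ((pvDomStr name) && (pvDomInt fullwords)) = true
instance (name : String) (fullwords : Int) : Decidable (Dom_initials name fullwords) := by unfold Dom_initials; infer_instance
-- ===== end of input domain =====

-- B replaces A's reverse-process-reverse strategy with a single forward pass that
-- decides per index whether the word stays full (simpler decomposition; same cost).


-- ===== PORT A =====
def initials (name : String) (fullwords : Int) : String :=
  let names0 := (PySem.Str.split? name " ").getD []
  let names := if fullwords < 0 then names0.reverse else names0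
  let parts := (PySem.List.enumerate names).foldl
      (fun parts p =>
        parts ++ [if p.1 < |fullwords| then p.2 else PySem.Str.slice p.2 none (some 1) ++ "."]) []
  let parts := if fullwords < 0 then parts.reverse else parts
  PySem.Str.join " " parts

-- ===== PORT B =====
def initials_alt (name : String) (fullwords : Int) : String :=
  let words := (PySem.Str.split? name " ").getD []
  let n : Int := words.length
  PySem.Str.join " " ((PySem.List.enumerate words).map (fun p =>
    if (if 0 ≤ fullwords then p.1 < fullwords else n + fullwords ≤ p.1)
    then p.2 else PySem.Str.slice p.2 none (some 1) ++ "."))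

-- ===== PRECONDITION & SPEC =====
def Spec_initials (name : String) (fullwords : Int) (out : String) : Prop := out = initials_alt name fullwords
instance (name : String) (fullwords : Int) (out : String) : Decidable (Spec_initials name fullwords out) := by unfold Spec_initials; infer_instance

-- ===== CLAIM (what is proved, stated in full; the proofs are below) =====
def Claim_equal_initials : Prop := ∀ (name : String) (fullwords : Int), Dom_initials name fullwords → Spec_initials name fullwords (initials name fullwords)

-- ===== LEMMAS AND PROOFS =====

-- element of enumerate
theorem getElem_enum {α : Type} (xs : List α) (s : Int) (k : Nat) (hk : k < xs.length)
    (hk' : k < (PySem.List.enumerate xs s).length) :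
    (PySem.List.enumerate xs s)[k] = (s + k, xs[k]) := by
  induction xs generalizing s k with
  | nil => simp at hk
  | cons x xs ih =>
    cases k with
    | zero => simp [PySem.List.enumerate_cons]
    | succ k =>
      have hk2 : k < xs.length := by simpa using hk
      have := ih (s + 1) k hk2 (by simpa [PySem.List.length_enumerate] using hk2)
      simp [PySem.List.enumerate_cons, this]
      omega

-- the reversed loop over the reversed word list equals the forward positional pass
theorem rev_pass (L : List String) (fw : Int) (hfw : fw < 0) :
    ((PySem.List.enumerate L.reverse).map
      (fun p => if p.1 < |fw| then p.2 else PySem.Str.slice p.2 none (some 1) ++ ".")).reverse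
    = (PySem.List.enumerate L).map (fun p =>
        if (if 0 ≤ fw then p.1 < fw else (L.length : Int) + fw ≤ p.1)
        then p.2 else PySem.Str.slice p.2 none (some 1) ++ ".") := by
  apply List.ext_getElem
  · simp [PySem.List.length_enumerate]
  · intro i h1 h2
    have hiL : i < L.length := by simpa [PySem.List.length_enumerate] using h2
    simp only [List.getElem_reverse, List.getElem_map, List.length_map,
      PySem.List.length_enumerate, List.length_reverse]
    rw [getElem_enum L.reverse 0 (L.length - 1 - i) (by simp; omega)
          (by simp [PySem.List.length_enumerate]; omega),
        getElem_enum L 0 i hiL (by simp [PySem.List.length_enumerate]; omega)]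
    simp only [List.getElem_reverse, List.length_reverse]
    have heq : L.length - 1 - (L.length - 1 - i) = i := by omega
    simp only [heq, zero_add]
    have hcond : (((L.length - 1 - i : Nat) : Int) < |fw|) ↔ ((L.length : Int) + fw ≤ (i : Int)) := by
      rw [abs_of_neg hfw]
      have : ((L.length - 1 - i : Nat) : Int) = (L.length : Int) - 1 - i := by omega
      rw [this]; omega
    simp only [not_le.mpr hfw, if_false]
    by_cases h : (L.length : Int) + fw ≤ (i : Int)
    · simp only [if_pos (hcond.mpr h), if_pos h]
    · simp only [if_neg (fun hc => h (hcond.mp hc)), if_neg h]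

-- ===== VERDICT (by name: the statement is the Claim_ definition above) =====
theorem initials_spec : Claim_equal_initials := by
  intro name fullwords _
  unfold Spec_initials initials initials_alt
  simp only [PySem.List.foldl_append_singleton_eq_map]
  by_cases hfw : fullwords < 0
  · simp only [if_pos hfw]
    exact congrArg _ (rev_pass _ fullwords hfw)
  · simp only [if_neg hfw]
    refine congrArg _ (List.map_congr_left ?_)
    intro p _
    have h0 : 0 ≤ fullwords := by omega
    simp only [abs_of_nonneg h0, if_pos h0]
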